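-- pv_equiv track=rewrite | github.com/Olu93/project_CREATED | latex/thesis_paper_version/helper/helper_code.py | check_if_d_after_c
-- ===== SOURCE A (Python) =====
-- def check_if_d_after_c(s):
--     if 'C' not in s:
--         return True
--     for i in range(len(s)):
--         if s[i] == 'C':
--             if i == len(s)-1:
--                 return False
--             if s[i + 1] != 'D':
--                 return False
--     return True
-- ===== SOURCE B (Python) =====
-- def check_if_d_after_c(s):
--     # Delete every "CD" occurrence; a 'C' survives iff it is not followed by 'D'.
--     return 'C' not in s.replace('CD', '')
-- ===== Notes on version B (the rewrite author's own statement) =====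
-- stated objective: idiomatic
-- what changed: Replaces the membership precheck and explicit index loop with bounds tests by a rewrite-then-test: delete every "CD" occurrence with str.replace and then do a single membership test for a surviving 'C'.
import Mathlib
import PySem

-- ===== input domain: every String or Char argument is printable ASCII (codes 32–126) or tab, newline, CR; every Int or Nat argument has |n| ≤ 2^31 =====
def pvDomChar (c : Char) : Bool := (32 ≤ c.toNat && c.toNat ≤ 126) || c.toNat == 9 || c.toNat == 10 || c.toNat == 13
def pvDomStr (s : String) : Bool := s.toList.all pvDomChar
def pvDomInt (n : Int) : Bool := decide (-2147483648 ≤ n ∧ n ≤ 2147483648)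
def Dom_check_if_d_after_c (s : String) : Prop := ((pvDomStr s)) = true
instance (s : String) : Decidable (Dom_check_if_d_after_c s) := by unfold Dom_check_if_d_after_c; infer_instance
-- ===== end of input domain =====

-- B replaces A's membership precheck + explicit index loop (with bounds tests) by a
-- rewrite-then-test: delete every "CD" occurrence with str.replace, then one
-- membership test for a surviving 'C' (idiomatic; same cost).

-- ===== PORT A =====
-- the loop body of A's 'for i in range(len(s))'; indices from range(len s) are always
-- in range, so s[i] is ported as cs.getD i ' ' (the default is never used)
def check_if_d_after_c_go (cs : List Char) : List Nat → Bool
  | [] => true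
  | i :: rest =>
    if cs.getD i ' ' = 'C' then
      if i = cs.length - 1 then false
      else if cs.getD (i + 1) ' ' ≠ 'D' then false
      else check_if_d_after_c_go cs rest
    else check_if_d_after_c_go cs rest

def check_if_d_after_c (s : String) : Bool :=
  if ¬ (PySem.Str.isIn "C" s) then true
  else check_if_d_after_c_go s.toList (List.range s.toList.length)

-- ===== PORT B =====
def check_if_d_after_c_alt (s : String) : Bool :=
  !(PySem.Str.isIn "C" (PySem.Str.replace s "CD" ""))

-- ===== PRECONDITION & SPEC =====
def Spec_check_if_d_after_c (s : String) (out : Bool) : Prop := out = check_if_d_after_c_alt s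
instance (s : String) (out : Bool) : Decidable (Spec_check_if_d_after_c s out) := by unfold Spec_check_if_d_after_c; infer_instance

-- ===== CLAIM (what is proved, stated in full; the proofs are below) =====
def Claim_equal_check_if_d_after_c : Prop := ∀ (s : String), Dom_check_if_d_after_c s → Spec_check_if_d_after_c s (check_if_d_after_c s)

-- ===== LEMMAS AND PROOFS =====

-- the mathematical content of replacing "CD" by "": delete each "CD" occurrence
def delCD : List Char → List Char
  | [] => []
  | 'C' :: 'D' :: t => delCD t
  | 'C' :: t => 'C' :: delCD t
  | c :: t => c :: delCD t

-- "every 'C' is immediately followed by 'D'", index form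
def Pidx (cs : List Char) : Prop :=
  ∀ i (h : i < cs.length), cs[i] = 'C' → ∃ h2 : i + 1 < cs.length, cs[i + 1] = 'D'

-- singleton infix is membership
theorem infix_singleton_iff (cs : List Char) (a : Char) : ([a] <:+: cs) ↔ a ∈ cs := by
  constructor
  · rintro ⟨u, v, rfl⟩; simp
  · intro hm
    obtain ⟨l1, l2, rfl⟩ := List.append_of_mem hm
    exact ⟨l1, l2, by simp⟩

theorem delCD_cons_of_not_CD (c : Char) (t : List Char)
    (hform : ¬ (c = 'C' ∧ ∃ t', t = 'D' :: t')) :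
    delCD (c :: t) = c :: delCD t := by
  rw [delCD.eq_def]
  split
  · simp_all
  · rename_i heq
    exact absurd ⟨by injection heq, by injection heq with _ h; exact ⟨_, h⟩⟩ hform
  · rename_i _ heq
    injection heq with h1 h2
    rw [h1, h2]
  · rename_i heq
    injection heq with h1 h2
    rw [h1, h2]

-- PySem.Chars.replace.go with old = "CD", new = "" computes delCD
theorem replace_go_eq_delCD (fuel : Nat) (l acc : List Char) (h : l.length ≤ fuel) :
    PySem.Chars.replace.go ['C', 'D'] [] fuel l acc = acc.reverse ++ delCD l := by
  induction fuel generalizing l acc with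
  | zero =>
    have hl : l = [] := by
      cases l with
      | nil => rfl
      | cons a t => simp at h
    subst hl; simp [PySem.Chars.replace.go, delCD]
  | succ fuel ih =>
    match l with
    | [] => simp [PySem.Chars.replace.go, delCD]
    | c :: t =>
      by_cases hp : (['C', 'D'] : List Char).isPrefixOf (c :: t) = true
      · obtain ⟨u, hu⟩ := List.isPrefixOf_iff_prefix.mp hp
        simp only [List.cons_append, List.nil_append] at hu
        obtain ⟨rfl, rfl⟩ : c = 'C' ∧ t = 'D' :: u := by
          refine ⟨?_, ?_⟩
          · injection hu with h1 _; exact h1.symm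
          · injection hu with _ h2; exact h2.symm
        simp only [PySem.Chars.replace.go, hp, if_pos]
        rw [ih _ _ (by simp at h ⊢; omega)]
        simp [delCD]
      · have hform : ¬ (c = 'C' ∧ ∃ t', t = 'D' :: t') := by
          rintro ⟨rfl, t', rfl⟩
          exact hp (by simp [List.isPrefixOf])
        simp only [PySem.Chars.replace.go, hp, if_neg, Bool.not_eq_true]
        rw [ih _ _ (by simp at h ⊢; omega)]
        rw [delCD_cons_of_not_CD c t hform]
        simp

-- shifting Pidx across a harmless head
theorem Pidx_cons (c : Char) (t : List Char) (hc : c ≠ 'C' ∨ ∃ t', t = 'D' :: t') :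
    Pidx (c :: t) ↔ Pidx t := by
  constructor
  · intro hP i hi hCi
    obtain ⟨h2, hD⟩ := hP (i + 1) (by simp; omega) (by simpa using hCi)
    exact ⟨by simp at h2; omega, by simpa using hD⟩
  · intro hP i hi hCi
    cases i with
    | zero =>
      simp at hCi
      rcases hc with hne | ⟨t', rfl⟩
      · exact absurd hCi hne
      · exact ⟨by simp, by simp⟩
    | succ i =>
      simp at hi
      obtain ⟨h2, hD⟩ := hP i (by omega) (by simpa using hCi)
      exact ⟨by simp; omega, by simpa using hD⟩

-- a 'C' survives delCD iff some 'C' violates the condition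
theorem mem_delCD_iff (cs : List Char) : 'C' ∉ delCD cs ↔ Pidx cs := by
  induction cs using delCD.induct with
  | case1 =>
    simp [delCD]
    intro i hi
    simp at hi
  | case2 t ih =>
    rw [delCD]
    rw [ih, Pidx_cons 'C' ('D' :: t) (Or.inr ⟨t, rfl⟩),
      Pidx_cons 'D' t (Or.inl (by decide))]
  | case3 t hside ih =>
    have hform : ¬ (('C' : Char) = 'C' ∧ ∃ t', t = 'D' :: t') := by
      rintro ⟨_, t', rfl⟩
      exact hside t' rfl
    rw [delCD_cons_of_not_CD _ _ hform]
    constructor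
    · intro hmem; exact absurd (by simp) hmem
    · intro hP
      exfalso
      obtain ⟨h2, hD⟩ := hP 0 (by simp) (by simp)
      cases t with
      | nil => simp at h2
      | cons d t' =>
        simp at hD
        exact hform ⟨rfl, t', by rw [hD]⟩
  | case4 c t hside1 hside2 ih =>
    have hcC : c ≠ 'C' := hside2
    have hform : ¬ (c = 'C' ∧ ∃ t', t = 'D' :: t') := fun ⟨h, _⟩ => hcC h
    rw [delCD_cons_of_not_CD _ _ hform, Pidx_cons c t (Or.inl hcC)]
    simp [ih, Ne.symm hcC]

-- A's early-exit loop is List.all of the per-index condition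
theorem go_eq_all (cs : List Char) (l : List Nat) :
    check_if_d_after_c_go cs l =
      l.all (fun i => !(cs.getD i ' ' = 'C') ||
        (!(i = cs.length - 1) && (cs.getD (i + 1) ' ' = 'D'))) := by
  induction l with
  | nil => rfl
  | cons i rest ih =>
    rw [List.all_cons, ← ih]
    simp only [List.getD]
    by_cases h1 : cs[i]?.getD ' ' = 'C'
    · by_cases h2 : i = cs.length - 1
      · simp [check_if_d_after_c_go, List.getD, h2]
      · by_cases h3 : cs[i + 1]?.getD ' ' = 'D'
        · simp [check_if_d_after_c_go, List.getD, h1, h2, h3]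
        · simp [check_if_d_after_c_go, List.getD, h1, h2, h3]
    · simp [check_if_d_after_c_go, List.getD, h1]

-- the per-index condition over all of range n, propositionally
theorem loop_iff (cs : List Char) :
    check_if_d_after_c_go cs (List.range cs.length) = true ↔ Pidx cs := by
  rw [go_eq_all, List.all_eq_true]
  constructor
  · intro h i hi hc
    have := h i (List.mem_range.mpr hi)
    rw [List.getD_eq_getElem _ _ hi] at this
    simp only [hc] at this
    simp only [List.getD] at this
    simp at this
    obtain ⟨hne, hD⟩ := this
    have hlt : i + 1 < cs.length := by omega
    rw [List.getElem?_eq_getElem hlt, Option.getD_some] at hD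
    exact ⟨hlt, hD⟩
  · intro h i hmem
    have hi := List.mem_range.mp hmem
    rw [List.getD_eq_getElem _ _ hi]
    by_cases hc : cs[i] = 'C'
    · obtain ⟨h2, hD⟩ := h i hi hc
      have hne : i ≠ cs.length - 1 := by omega
      simp [hc, hne, List.getD, List.getElem?_eq_getElem h2, hD]
    · simp [hc]

-- A decides Pidx
theorem portA_iff (s : String) : check_if_d_after_c s = true ↔ Pidx s.toList := by
  unfold check_if_d_after_c
  by_cases hC : PySem.Str.isIn "C" s = true
  · rw [if_neg (not_not_intro hC)]
    exact loop_iff s.toList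
  · rw [if_pos hC]
    have hmem : 'C' ∉ s.toList := by
      intro hm
      exact hC ((PySem.Str.isIn_iff_infix "C" s).mpr
        ((infix_singleton_iff s.toList 'C').mpr hm))
    refine ⟨fun _ i hi hc => absurd (hc ▸ List.getElem_mem _) hmem, fun _ => rfl⟩

-- B decides Pidx
theorem portB_iff (s : String) : check_if_d_after_c_alt s = true ↔ Pidx s.toList := by
  have hrep : (PySem.Str.replace s "CD" "").toList = delCD s.toList := by
    rw [PySem.Str.toList_replace]
    show PySem.Chars.replace s.toList ['C', 'D'] [] = delCD s.toList
    simp only [PySem.Chars.replace]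
    rw [if_neg (by decide)]
    exact replace_go_eq_delCD s.toList.length s.toList [] le_rfl
  unfold check_if_d_after_c_alt
  rw [Bool.not_eq_true']
  rw [PySem.Str.isIn_eq, hrep, PySem.Chars.isIn_eq_false_iff]
  rw [show ("C".toList : List Char) = ['C'] from rfl, infix_singleton_iff]
  exact mem_delCD_iff s.toList

theorem check_if_d_after_c_eq (s : String) :
    check_if_d_after_c s = check_if_d_after_c_alt s := by
  rw [Bool.eq_iff_iff, portA_iff, portB_iff]

-- ===== VERDICT (by name: the statement is the Claim_ definition above) =====
theorem check_if_d_after_c_spec : Claim_equal_check_if_d_after_c := by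
  intro s _
  exact check_if_d_after_c_eq s
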